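-- pv_equiv track=rewrite | github.com/MrBrantCode/unitest_baseline | mut_generate/mist_train_taco/taco_718/solution.py | maximize_even_position_sum
-- ===== SOURCE A (Python) =====
-- def maximize_even_position_sum(a, n):
--     # Calculate the initial sum of elements on even positions
--     evensum = sum(a[i] for i in range(0, n, 2))
--
--     # Helper function to find the maximum subarray sum
--     def maxSubArraySum(arr, size):
--         max_so_far = 0
--         max_ending_here = 0
--         for i in range(size):
--             max_ending_here = max_ending_here + arr[i]
--             if max_ending_here < 0:
--                 max_ending_here = 0
--             elif max_so_far < max_ending_here:
--                 max_so_far = max_ending_here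
--         return max_so_far
--
--     # Calculate potential gains from reversing subarrays
--     x = [a[i] - a[i - 1] for i in range(1, n, 2)]
--     y = [a[i] - a[i + 1] if i + 1 < n else 0 for i in range(1, n, 2)]
--
--     # Find the maximum gain from reversing subarrays
--     p = maxSubArraySum(x, len(x))
--     q = maxSubArraySum(y, len(y))
--     add = max(p, q)
--
--     # If the gain is positive, add it to the initial even sum
--     if add > 0:
--         evensum += add
--
--     return evensum
-- ===== SOURCE B (Python) =====
-- def maximize_even_position_sum(a, n):
--     # Prefix-sum / running-minimum formulation of the best reversal gain:
--     # for each gain sequence the best subarray sum is max_j (P[j] - min_{i<j} P[i]),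
--     # tracked with prefix sums and running minima in one pass (no Kadane clamp,
--     # no intermediate lists, no final positivity branch).
--     evensum = 0
--     for i in range(0, n, 2):
--         evensum += a[i]
--     px = mx = py = my = best = 0
--     for i in range(1, n, 2):
--         px += a[i] - a[i - 1]
--         if px - mx > best:
--             best = px - mx
--         if px < mx:
--             mx = px
--         py += a[i] - a[i + 1] if i + 1 < n else 0
--         if py - my > best:
--             best = py - my
--         if py < my:
--             my = py
--     return evensum + best
-- ===== Notes on version B (the rewrite author's own statement) =====
-- stated objective: alternative
-- what changed: Replaces Kadane's clamp-at-zero maximum-subarray helper (run twice on two materialized difference lists) by the prefix-sum/running-minimum characterization max_j (P[j] - min_{i<j} P[i]), maintained for both gain sequences in one pass with no intermediate lists and no final positivity branch.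
import Mathlib
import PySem

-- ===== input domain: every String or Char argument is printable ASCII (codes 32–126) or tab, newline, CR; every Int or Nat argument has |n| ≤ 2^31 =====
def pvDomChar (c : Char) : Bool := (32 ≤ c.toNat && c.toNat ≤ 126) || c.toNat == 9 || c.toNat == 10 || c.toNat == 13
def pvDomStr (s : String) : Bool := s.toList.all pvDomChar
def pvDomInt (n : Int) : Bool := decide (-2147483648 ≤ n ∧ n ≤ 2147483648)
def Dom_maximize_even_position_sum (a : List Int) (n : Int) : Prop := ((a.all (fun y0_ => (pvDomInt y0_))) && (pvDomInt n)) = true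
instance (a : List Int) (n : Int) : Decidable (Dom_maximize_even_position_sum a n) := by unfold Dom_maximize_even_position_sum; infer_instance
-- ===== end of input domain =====

-- B replaces A's Kadane helper on two materialized difference lists by the
-- prefix-sum / running-minimum formulation of the best subarray gain, in one pass
-- (objective: alternative algorithm, same asymptotic cost).

-- ===== PORT A =====
-- body of A's maxSubArraySum loop: state (max_so_far, max_ending_here)
def pvKStep (st : Int × Int) (v : Int) : Int × Int :=
  let meh := st.2 + v
  if meh < 0 then (st.1, 0)
  else if st.1 < meh then (meh, meh)
  else (st.1, meh)

def pvMaxSubArraySum (arr : List Int) (size : Int) : Int :=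
  ((PySem.List.pyRange 0 size 1).foldl (fun st i => pvKStep st (PySem.List.pyGetD arr i 0)) (0, 0)).1

def maximize_even_position_sum (a : List Int) (n : Int) : Int :=
  let evensum := ((PySem.List.pyRange 0 n 2).map (fun i => PySem.List.pyGetD a i 0)).sum
  let x := (PySem.List.pyRange 1 n 2).map (fun i => PySem.List.pyGetD a i 0 - PySem.List.pyGetD a (i - 1) 0)
  let y := (PySem.List.pyRange 1 n 2).map (fun i => if i + 1 < n then PySem.List.pyGetD a i 0 - PySem.List.pyGetD a (i + 1) 0 else 0)
  let p := pvMaxSubArraySum x (x.length : Int)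
  let q := pvMaxSubArraySum y (y.length : Int)
  let add := max p q
  if add > 0 then evensum + add else evensum

-- ===== PORT B =====
-- body of B's loop: state ((px, mx), (py, my), best)
def pvStepB (a : List Int) (n : Int) (st : (Int × Int) × (Int × Int) × Int) (i : Int) :
    (Int × Int) × (Int × Int) × Int :=
  let px := st.1.1 + (PySem.List.pyGetD a i 0 - PySem.List.pyGetD a (i - 1) 0)
  let b1 := if px - st.1.2 > st.2.2 then px - st.1.2 else st.2.2
  let mx := if px < st.1.2 then px else st.1.2
  let py := st.2.1.1 + (if i + 1 < n then PySem.List.pyGetD a i 0 - PySem.List.pyGetD a (i + 1) 0 else 0)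
  let b2 := if py - st.2.1.2 > b1 then py - st.2.1.2 else b1
  let my := if py < st.2.1.2 then py else st.2.1.2
  ((px, mx), (py, my), b2)

def maximize_even_position_sum_alt (a : List Int) (n : Int) : Int :=
  let evensum := (PySem.List.pyRange 0 n 2).foldl (fun s i => s + PySem.List.pyGetD a i 0) 0
  let st := (PySem.List.pyRange 1 n 2).foldl (pvStepB a n) (((0 : Int), (0 : Int)), ((0 : Int), (0 : Int)), (0 : Int))
  evensum + st.2.2

-- ===== PRECONDITION & SPEC =====
-- Pre_: A indexes a[i] for every i < n, so it raises IndexError iff n > len(a).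
def Pre_maximize_even_position_sum (a : List Int) (n : Int) : Prop := n ≤ (a.length : Int)
instance (a : List Int) (n : Int) : Decidable (Pre_maximize_even_position_sum a n) := by unfold Pre_maximize_even_position_sum; infer_instance
def pvWitness_maximize_even_position_sum : List Int × Int := ([3, -1, 4, -1, 5], 5)

def Spec_maximize_even_position_sum (a : List Int) (n : Int) (out : Int) : Prop := out = maximize_even_position_sum_alt a n
instance (a : List Int) (n : Int) (out : Int) : Decidable (Spec_maximize_even_position_sum a n out) := by unfold Spec_maximize_even_position_sum; infer_instance

-- ===== CLAIM =====
def Claim_equal_maximize_even_position_sum : Prop := ∀ (a : List Int) (n : Int), Dom_maximize_even_position_sum a n → Pre_maximize_even_position_sum a n → Spec_maximize_even_position_sum a n (maximize_even_position_sum a n)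

-- ===== LEMMAS AND PROOFS =====

theorem pv_foldl_add_eq_sum_map (f : Int → Int) : ∀ (l : List Int) (c : Int),
    l.foldl (fun s i => s + f i) c = c + (l.map f).sum := by
  intro l
  induction l with
  | nil => intro c; simp
  | cons h t ih => intro c; simp [List.foldl, ih]; ring

-- Kadane's max_so_far never decreases along the fold.
theorem pv_kadane_mono : ∀ (l : List Int) (st : Int × Int), st.1 ≤ (l.foldl pvKStep st).1 := by
  intro l
  induction l with
  | nil => intro st; simp
  | cons h t ih =>
    intro st
    have h1 : st.1 ≤ (pvKStep st h).1 := by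
      simp only [pvKStep]; split_ifs <;> simp <;> omega
    exact le_trans h1 (ih (pvKStep st h))

-- Core: B's prefix-sum/running-minimum pass computes max of the two Kadane results.
-- Invariant: meh_x = px - mx, meh_y = py - my, best = max sofx sofy, 0 ≤ sofx, 0 ≤ sofy.
theorem pv_main (fx fy : Int → Int) : ∀ (l : List Int) (px mx py my best sofx sofy : Int),
    best = max sofx sofy → 0 ≤ sofx → 0 ≤ sofy →
    (l.foldl (fun st i =>
      let px' := st.1.1 + fx i
      let b1 := if px' - st.1.2 > st.2.2 then px' - st.1.2 else st.2.2
      let mx' := if px' < st.1.2 then px' else st.1.2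
      let py' := st.2.1.1 + fy i
      let b2 := if py' - st.2.1.2 > b1 then py' - st.2.1.2 else b1
      let my' := if py' < st.2.1.2 then py' else st.2.1.2
      ((px', mx'), (py', my'), b2)) ((px, mx), (py, my), best)).2.2
    = max ((l.map fx).foldl pvKStep (sofx, px - mx)).1 ((l.map fy).foldl pvKStep (sofy, py - my)).1 := by
  intro l
  induction l with
  | nil => intro px mx py my best sofx sofy hb _ _; simpa using hb
  | cons h t ih =>
    intro px mx py my best sofx sofy hb hx hy
    simp only [List.foldl_cons, List.map_cons]
    have ex : pvKStep (sofx, px - mx) (fx h)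
        = (max sofx (px - mx + fx h),
           (px + fx h) - (if px + fx h < mx then px + fx h else mx)) := by
      simp only [pvKStep]
      split_ifs <;> simp only [Prod.mk.injEq] <;> constructor <;> omega
    have ey : pvKStep (sofy, py - my) (fy h)
        = (max sofy (py - my + fy h),
           (py + fy h) - (if py + fy h < my then py + fy h else my)) := by
      simp only [pvKStep]
      split_ifs <;> simp only [Prod.mk.injEq] <;> constructor <;> omega
    rw [ex, ey]
    refine ih (px + fx h) (if px + fx h < mx then px + fx h else mx)
             (py + fy h) (if py + fy h < my then py + fy h else my)
             _ _ _ ?_ (le_trans hx (le_max_left _ _)) (le_trans hy (le_max_left _ _))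
    subst hb
    split_ifs <;> omega

theorem maximize_even_position_sum_eq (a : List Int) (n : Int) :
    maximize_even_position_sum a n = maximize_even_position_sum_alt a n := by
  unfold maximize_even_position_sum maximize_even_position_sum_alt pvMaxSubArraySum pvStepB
  dsimp only
  rw [pv_foldl_add_eq_sum_map (fun i => PySem.List.pyGetD a i 0) (PySem.List.pyRange 0 n 2) 0]
  set fx : Int → Int := fun i => PySem.List.pyGetD a i 0 - PySem.List.pyGetD a (i - 1) 0 with hfx
  set fy : Int → Int := fun i => if i + 1 < n then PySem.List.pyGetD a i 0 - PySem.List.pyGetD a (i + 1) 0 else 0 with hfy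
  -- reduce A's index-based Kadane folds to folds over the difference lists
  have hk : ∀ (xs : List Int) (init : Int × Int),
      (PySem.List.pyRange 0 (xs.length : Int) 1).foldl
        (fun st i => pvKStep st (PySem.List.pyGetD xs i 0)) init = xs.foldl pvKStep init := by
    intro xs init
    have := PySem.List.foldl_pyRange_pyGetD (xs := xs) (a := 0) (f := pvKStep) (d := 0) (init := init) (by omega)
    simpa using this
  rw [hk, hk]
  have hmain := pv_main fx fy (PySem.List.pyRange 1 n 2) 0 0 0 0 0 0 0 (by simp) le_rfl le_rfl
  simp only [sub_zero] at hmain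
  rw [hmain]
  have px := pv_kadane_mono ((PySem.List.pyRange 1 n 2).map fx) (0, 0)
  have py := pv_kadane_mono ((PySem.List.pyRange 1 n 2).map fy) (0, 0)
  simp only at px py
  split_ifs with h
  · ring
  · have : max (((PySem.List.pyRange 1 n 2).map fx).foldl pvKStep (0, 0)).1
               (((PySem.List.pyRange 1 n 2).map fy).foldl pvKStep (0, 0)).1 = 0 := by
      rw [max_def]; split_ifs <;> omega
    omega

-- ===== VERDICT =====
theorem maximize_even_position_sum_spec : Claim_equal_maximize_even_position_sum := by
  intro a n _ _
  unfold Spec_maximize_even_position_sum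
  exact maximize_even_position_sum_eq a n
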